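-- pv_equiv track=rewrite | github.com/joshua-cheng2210/CSCI-1135 | lab07.py | smallest_window2
-- ===== SOURCE A (Python) =====
-- def smallest_window2(haystack, need):
--     string = haystack
--     out = []
--     out2 = []
--     for i in range(2, len(string) + 1):
--         for xxx in range(0, len(string) - i + 1):
--             out.append(string[xxx:xxx + i])
--
--     for xxx in out:
--         try:
--             for char in need:
--                 xxx.index(char)
--             out2.append(xxx)
--         except:
--             x = 0
--
--     return (min(out2))
-- ===== SOURCE B (Python) =====
-- def smallest_window2(haystack, need):
--     # Sliding scan: for each start, the SHORTEST valid window starting there is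
--     # lexicographically minimal among all valid windows with that start (a prefix
--     # precedes every extension), so the answer is the min of those candidates.
--     n = len(haystack)
--     need_set = set(need)
--     best = None
--     for i in range(n - 1):
--         missing = set(need_set)
--         for j in range(i, n):
--             missing.discard(haystack[j])
--             if j > i and not missing:
--                 cand = haystack[i:j + 1]
--                 if best is None or cand < best:
--                     best = cand
--                 break
--     if best is None:
--         raise ValueError("no substring of length >= 2 contains every needed character")
--     return best
-- ===== Notes on version B (the rewrite author's own statement) =====
-- stated objective: faster
-- what changed: Instead of materialising every substring of length >= 2 and filtering with try/index before taking min, B slides a scan from each start to the first position where all needed characters are covered (that shortest window is lex-minimal for its start, since a prefix precedes every extension) and keeps a running lexicographic minimum.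
import Mathlib
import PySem

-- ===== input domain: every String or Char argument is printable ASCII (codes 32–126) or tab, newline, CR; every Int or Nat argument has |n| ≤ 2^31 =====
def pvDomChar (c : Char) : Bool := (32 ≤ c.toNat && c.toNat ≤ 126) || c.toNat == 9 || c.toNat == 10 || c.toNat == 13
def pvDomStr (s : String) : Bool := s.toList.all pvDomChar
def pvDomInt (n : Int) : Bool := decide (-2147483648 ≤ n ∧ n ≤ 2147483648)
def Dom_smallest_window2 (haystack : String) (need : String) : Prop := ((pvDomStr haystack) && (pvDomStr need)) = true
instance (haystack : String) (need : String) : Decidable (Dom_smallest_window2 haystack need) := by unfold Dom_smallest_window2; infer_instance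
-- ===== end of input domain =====

-- B replaces A's enumerate-all-substrings-then-filter-then-min by a per-start scan to the first
-- covering position plus a running lexicographic minimum (objective: faster).


-- ===== PORT A =====
-- 'try: for char in need: xxx.index(char) / except' appends xxx iff every char of need occurs in xxx
def smallest_window2 (haystack : String) (need : String) : String :=
  let string := haystack
  let out : List String :=
    (PySem.List.pyRange 2 (PySem.Str.len string + 1)).foldl (fun out i =>
      (PySem.List.pyRange 0 (PySem.Str.len string - i + 1)).foldl (fun out xxx =>
        out ++ [PySem.Str.slice string (some xxx) (some (xxx + i))]) out) []
  let out2 : List String :=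
    out.foldl (fun out2 xxx =>
      if need.toList.all (fun char => PySem.Str.isIn (String.ofList [char]) xxx) then out2 ++ [xxx]
      else out2) []
  -- min(out2); Python raises ValueError on an empty out2 (excluded by Pre_)
  (PySem.List.min? out2 (fun x => x)).getD ""

-- ===== PORT B =====
-- inner 'for j in range(i, n)' of Source B: walk the suffix, discard each seen char from missing,
-- return the candidate haystack[i:j+1] at the first j with j > i and missing empty (the 'break');
-- none when the loop runs out without a hit
def pvFindWin (haystack : String) (i : Nat) : Nat → List Char → PySem.Set Char → Option String
  | _, [], _ => none
  | j, c :: rest, missing =>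
    let missing' := PySem.Set.discard missing c
    if i < j ∧ missing' = [] then
      some (PySem.Str.slice haystack (some (i : Int)) (some ((j : Int) + 1)))
    else
      pvFindWin haystack i (j + 1) rest missing'

-- 'if best is None or cand < best: best = cand' (cand? = none when the inner loop found nothing)
def pvBestUpdate (best : Option String) (cand? : Option String) : Option String :=
  match cand? with
  | none => best
  | some cand =>
    match best with
    | none => some cand
    | some b => if cand < b then some cand else some b

def smallest_window2_alt (haystack : String) (need : String) : String :=
  let n := haystack.toList.length        -- len(haystack)
  let needSet : PySem.Set Char := PySem.Set.ofList need.toList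
  let best : Option String :=
    (List.range (n - 1)).foldl (fun best i =>
      pvBestUpdate best (pvFindWin haystack i i (haystack.toList.drop i) needSet)) none
  -- Source B raises ValueError when best is still None (excluded by Pre_)
  best.getD ""

-- ===== PRECONDITION & SPEC =====
-- Pre_: exactly the inputs where A returns (out2 nonempty): the haystack has length ≥ 2 and contains
-- every character of need; elsewhere A's min([]) raises ValueError (and Source B raises ValueError too).
def Pre_smallest_window2 (haystack : String) (need : String) : Prop :=
  2 ≤ PySem.Str.len haystack ∧ (need.toList.all (fun c => haystack.toList.contains c)) = true
instance (haystack : String) (need : String) : Decidable (Pre_smallest_window2 haystack need) := by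
  unfold Pre_smallest_window2; infer_instance

def pvWitness_smallest_window2 : String × String := ("abca", "ab")

def Spec_smallest_window2 (haystack : String) (need : String) (out : String) : Prop := out = smallest_window2_alt haystack need
instance (haystack : String) (need : String) (out : String) : Decidable (Spec_smallest_window2 haystack need out) := by unfold Spec_smallest_window2; infer_instance

-- ===== CLAIM (what is proved, stated in full; the proofs are below) =====
def Claim_equal_smallest_window2 : Prop := ∀ (haystack : String) (need : String), Dom_smallest_window2 haystack need → Pre_smallest_window2 haystack need → Spec_smallest_window2 haystack need (smallest_window2 haystack need)

-- ===== LEMMAS AND PROOFS =====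

-- the common shape of every candidate substring: haystack[x : x+L]
def pvWin (h : String) (x L : Nat) : String :=
  PySem.Str.slice h (some (x : Int)) (some ((x : Int) + (L : Int)))

lemma pvWin_toList (h : String) (x L : Nat) :
    (pvWin h x L).toList = (h.toList.drop x).take L := by
  simp [pvWin, PySem.Str.toList_slice, PySem.Chars.slice_eq_listSlice,
    PySem.List.slice_natCast_add]

-- lists ordered lexicographically: a list never precedes one of its prefixes
lemma pvNot_append_lt (u w : List Char) : ¬ (u ++ w) < u := by
  induction u with
  | nil => exact fun h => by simp at h
  | cons c u ih => simpa [List.cons_lt_cons_iff] using ih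

-- a prefix is lexicographically ≤ (Python's string order = Lean's)
lemma pvPrefix_le (s t : String) (h : s.toList <+: t.toList) : s ≤ t := by
  rcases h with ⟨w, hw⟩
  refine le_of_not_gt fun hlt => ?_
  rw [String.lt_iff_toList_lt, ← hw] at hlt
  exact pvNot_append_lt _ _ hlt

lemma pvSingleton_infix (c : Char) (l : List Char) : [c] <:+: l ↔ c ∈ l := by
  constructor
  · intro h; exact h.subset (by simp)
  · intro h; obtain ⟨u, v, rfl⟩ := List.append_of_mem h; exact ⟨u, v, by simp⟩

-- membership in A's `out` list (the double append loop builds every substring of length ≥ 2)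
lemma pvMemOut (haystack : String) (s : String) :
    s ∈ ((PySem.List.pyRange 2 (PySem.Str.len haystack + 1)).foldl (fun out i =>
          (PySem.List.pyRange 0 (PySem.Str.len haystack - i + 1)).foldl (fun out xxx =>
            out ++ [PySem.Str.slice haystack (some xxx) (some (xxx + i))]) out) ([] : List String))
    ↔ ∃ x L : Nat, 2 ≤ L ∧ x + L ≤ haystack.toList.length ∧ s = pvWin haystack x L := by
  have h1 : ∀ (acc : List String),
      (PySem.List.pyRange 2 (PySem.Str.len haystack + 1)).foldl (fun out i =>
          (PySem.List.pyRange 0 (PySem.Str.len haystack - i + 1)).foldl (fun out xxx =>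
            out ++ [PySem.Str.slice haystack (some xxx) (some (xxx + i))]) out) acc
        = acc ++ (PySem.List.pyRange 2 (PySem.Str.len haystack + 1)).flatMap (fun i =>
            (PySem.List.pyRange 0 (PySem.Str.len haystack - i + 1)).map
              (fun xxx => PySem.Str.slice haystack (some xxx) (some (xxx + i)))) := by
    intro acc
    have hfun : (fun (out : List String) (i : Int) =>
        (PySem.List.pyRange 0 (PySem.Str.len haystack - i + 1)).foldl (fun out xxx =>
          out ++ [PySem.Str.slice haystack (some xxx) (some (xxx + i))]) out)
        = (fun (out : List String) (i : Int) =>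
            out ++ (PySem.List.pyRange 0 (PySem.Str.len haystack - i + 1)).map
              (fun xxx => PySem.Str.slice haystack (some xxx) (some (xxx + i)))) := by
      funext out i
      rw [PySem.List.foldl_append_singleton_eq_map]
    rw [hfun, PySem.List.foldl_append_eq_flatMap]
  rw [h1, List.nil_append, List.mem_flatMap]
  constructor
  · rintro ⟨i, hi, hs⟩
    rw [List.mem_map] at hs
    obtain ⟨xxx, hxxx, rfl⟩ := hs
    rw [PySem.List.mem_pyRange_one] at hi hxxx
    rw [PySem.Str.len_eq] at hi hxxx
    obtain ⟨L, rfl⟩ : ∃ L : Nat, i = (L : Int) := ⟨i.toNat, by omega⟩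
    obtain ⟨x, rfl⟩ : ∃ x : Nat, xxx = (x : Int) := ⟨xxx.toNat, by omega⟩
    exact ⟨x, L, by omega, by omega, rfl⟩
  · rintro ⟨x, L, hL, hxL, rfl⟩
    refine ⟨(L : Int), ?_, ?_⟩
    · rw [PySem.List.mem_pyRange_one, PySem.Str.len_eq]; omega
    · rw [List.mem_map]
      refine ⟨(x : Int), ?_, rfl⟩
      rw [PySem.List.mem_pyRange_one, PySem.Str.len_eq]; omega

lemma pvDiscard_nil (s : PySem.Set Char) (x : Char) (h : PySem.Set.discard s x = []) :
    ∀ c ∈ s, c = x := by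
  intro c hc
  by_contra hne
  have := (PySem.Set.mem_discard s x c).2 ⟨hc, hne⟩
  simp [h] at this

-- soundness of the inner scan: a returned window is haystack[i : e] with i + 2 ≤ e ≤ n,
-- and the chars consumed since j cover the missing set handed in
lemma pvFindWin_sound (haystack : String) (i : Nat) :
    ∀ (rest : List Char) (j : Nat) (m : PySem.Set Char),
      rest = haystack.toList.drop j → i ≤ j →
      ∀ w, pvFindWin haystack i j rest m = some w →
        ∃ e, j < e ∧ e ≤ haystack.toList.length ∧ i + 2 ≤ e ∧ w = pvWin haystack i (e - i) ∧
          ∀ c ∈ m, c ∈ (haystack.toList.drop j).take (e - j) := by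
  intro rest
  induction rest with
  | nil => intro j m _ _ w hw; simp [pvFindWin] at hw
  | cons c rest ih =>
    intro j m hrest hij w hw
    have hj : j < haystack.toList.length := by
      by_contra h
      rw [List.drop_eq_nil_of_le (by omega)] at hrest
      exact List.cons_ne_nil _ _ hrest
    have hdrop : haystack.toList.drop j = haystack.toList[j] :: haystack.toList.drop (j + 1) :=
      List.drop_eq_getElem_cons hj
    rw [hdrop] at hrest
    injection hrest with hc hrest'
    rw [pvFindWin] at hw
    split at hw
    · rename_i hcond
      refine ⟨j + 1, by omega, by omega, by omega, ?_, ?_⟩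
      · have harg : ((i : Int) + ((j + 1 - i : Nat) : Int)) = (j : Int) + 1 := by
          push_cast [Nat.cast_sub (by omega : i ≤ j + 1)]; omega
        rw [← Option.some_inj.mp hw]
        unfold pvWin
        rw [harg]
      · intro ch hch
        have hchc : ch = c := pvDiscard_nil _ _ hcond.2 ch hch
        simp only [hdrop, show j + 1 - j = 1 by omega, List.take_succ_cons, List.take_zero,
          List.mem_singleton]
        exact hchc.trans hc
    · rename_i hcond
      obtain ⟨e, he1, he2, he3, he4, he5⟩ :=
        ih (j + 1) (PySem.Set.discard m c) hrest' (by omega) w hw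
      refine ⟨e, by omega, he2, he3, he4, ?_⟩
      intro ch hch
      rw [hdrop]
      have htake : (haystack.toList[j] :: haystack.toList.drop (j + 1)).take (e - j)
          = haystack.toList[j] :: (haystack.toList.drop (j + 1)).take (e - (j + 1)) := by
        have : e - j = (e - (j + 1)) + 1 := by omega
        rw [this, List.take_succ_cons]
      rw [htake]
      by_cases hchc : ch = c
      · simp [hchc, hc]
      · have := he5 ch ((PySem.Set.mem_discard m c ch).2 ⟨hch, hchc⟩)
        exact List.mem_cons_of_mem _ this

-- completeness/minimality: if some end e would do, the scan returns a window ending at e' ≤ e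
lemma pvFindWin_complete (haystack : String) (i : Nat) :
    ∀ (rest : List Char) (j : Nat) (m : PySem.Set Char),
      rest = haystack.toList.drop j → i ≤ j →
      ∀ e, j < e → e ≤ haystack.toList.length → i + 2 ≤ e →
        (∀ c ∈ m, c ∈ (haystack.toList.drop j).take (e - j)) →
        ∃ w e', pvFindWin haystack i j rest m = some w ∧ i + 2 ≤ e' ∧ e' ≤ e ∧
          w = pvWin haystack i (e' - i) := by
  intro rest
  induction rest with
  | nil =>
    intro j m hrest _ e he1 he2 _ _
    exfalso
    have : haystack.toList.drop j ≠ [] := by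
      apply List.ne_nil_of_length_pos
      rw [List.length_drop]; omega
    exact this hrest.symm
  | cons c rest ih =>
    intro j m hrest hij e he1 he2 he3 hcov
    have hj : j < haystack.toList.length := by omega
    have hdrop : haystack.toList.drop j = haystack.toList[j] :: haystack.toList.drop (j + 1) :=
      List.drop_eq_getElem_cons hj
    rw [hdrop] at hrest
    injection hrest with hc hrest'
    rw [pvFindWin]
    split
    · rename_i hcond
      refine ⟨_, j + 1, rfl, by omega, by omega, ?_⟩
      have harg : ((i : Int) + ((j + 1 - i : Nat) : Int)) = (j : Int) + 1 := by
        push_cast [Nat.cast_sub (by omega : i ≤ j + 1)]; omega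
      unfold pvWin
      rw [harg]
    · rename_i hcond
      have hje : j + 1 < e := by
        rcases Nat.lt_or_ge (j + 1) e with h | h
        · exact h
        · exfalso
          apply hcond
          have hee : e = j + 1 := by omega
          constructor
          · omega
          · rw [List.eq_nil_iff_forall_not_mem]
            intro ch hch
            rw [PySem.Set.mem_discard] at hch
            have h2 := hcov ch hch.1
            rw [hee] at h2
            simp only [hdrop, show j + 1 - j = 1 by omega, List.take_succ_cons, List.take_zero,
              List.mem_singleton] at h2
            exact hch.2 (h2.trans hc.symm)
      have hcov' : ∀ ch ∈ PySem.Set.discard m c,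
          ch ∈ (haystack.toList.drop (j + 1)).take (e - (j + 1)) := by
        intro ch hch
        rw [PySem.Set.mem_discard] at hch
        have := hcov ch hch.1
        rw [hdrop] at this
        have htake : (haystack.toList[j] :: haystack.toList.drop (j + 1)).take (e - j)
            = haystack.toList[j] :: (haystack.toList.drop (j + 1)).take (e - (j + 1)) := by
          have : e - j = (e - (j + 1)) + 1 := by omega
          rw [this, List.take_succ_cons]
        rw [htake] at this
        rcases List.mem_cons.mp this with h | h
        · exact absurd (h.trans hc.symm) hch.2
        · exact h
      exact ih (j + 1) (PySem.Set.discard m c) hrest' (by omega) e hje he2 he3 hcov'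

-- the outer loop of B is a running minimum over the per-start candidates
lemma pvRunMin_none (f : Nat → Option String) (l : List Nat) :
    ∀ init, l.foldl (fun best i => pvBestUpdate best (f i)) init = none →
      init = none ∧ ∀ i ∈ l, f i = none := by
  induction l with
  | nil => intro init h; simp only [List.foldl_nil] at h; exact ⟨h, by simp⟩
  | cons i l ih =>
    intro init h
    rw [List.foldl_cons] at h
    obtain ⟨hstep0, hall⟩ := ih _ h
    have hstep : pvBestUpdate init (f i) = none := hstep0
    have hni : init = none ∧ f i = none := by
      rcases hf : f i with _ | cand
      · rw [hf] at hstep; exact ⟨hstep, rfl⟩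
      · exfalso
        rw [hf] at hstep
        rcases hi : init with _ | b
        · rw [hi] at hstep
          have : some cand = none := hstep
          cases this
        · rw [hi] at hstep
          have : (if cand < b then some cand else some b) = none := hstep
          split at this <;> cases this
    refine ⟨hni.1, fun i' hi' => ?_⟩
    rcases List.mem_cons.mp hi' with rfl | hmem
    · exact hni.2
    · exact hall _ hmem

lemma pvRunMin_some (f : Nat → Option String) (l : List Nat) :
    ∀ init b, l.foldl (fun best i => pvBestUpdate best (f i)) init = some b →
      (init = some b ∨ ∃ i ∈ l, f i = some b) ∧
      (∀ b0, init = some b0 → b ≤ b0) ∧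
      (∀ i ∈ l, ∀ w, f i = some w → b ≤ w) := by
  induction l with
  | nil =>
    intro init b h
    simp only [List.foldl_nil] at h
    refine ⟨Or.inl h, fun b0 h0 => ?_, by simp⟩
    rw [h] at h0
    exact le_of_eq (Option.some_inj.mp h0)
  | cons i l ih =>
    intro init b h
    rw [List.foldl_cons] at h
    obtain ⟨hmem0, hinit0, hrest⟩ := ih _ _ h
    have hmem' : pvBestUpdate init (f i) = some b ∨ ∃ i' ∈ l, f i' = some b := hmem0
    have hinit' : ∀ b0, pvBestUpdate init (f i) = some b0 → b ≤ b0 := hinit0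
    have key : (init = some b ∨ f i = some b ∨ ∃ i' ∈ l, f i' = some b) ∧
        (∀ b0, init = some b0 → b ≤ b0) ∧ (∀ w, f i = some w → b ≤ w) := by
      rcases hf : f i with _ | cand
      · have hupd : pvBestUpdate init (f i) = init := by rw [hf]; rfl
        refine ⟨?_, fun b0 h0 => hinit' b0 (by rw [hupd]; exact h0),
          fun w hw => nomatch hw⟩
        rcases hmem' with hm | hm
        · exact Or.inl (by rw [← hupd]; exact hm)
        · exact Or.inr (Or.inr hm)
      · rcases hi : init with _ | b0
        · have hupd : pvBestUpdate init (f i) = some cand := by rw [hf, hi]; rfl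
          have hbc : b ≤ cand := hinit' cand hupd
          refine ⟨?_, ?_, ?_⟩
          · rcases hmem' with hm | hm
            · rw [hupd] at hm
              exact Or.inr (Or.inl hm)
            · exact Or.inr (Or.inr hm)
          · intro b1 h1
            exact nomatch h1
          · intro w hw
            exact (Option.some_inj.mp hw) ▸ hbc
        · have hupd : pvBestUpdate init (f i) = if cand < b0 then some cand else some b0 := by
            rw [hf, hi]; rfl
          by_cases hcb : cand < b0
          · have hupd' : pvBestUpdate init (f i) = some cand := by rw [hupd, if_pos hcb]
            have hble_cand : b ≤ cand := hinit' cand hupd'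
            have hble_b0 : b ≤ b0 := le_trans hble_cand (le_of_lt hcb)
            refine ⟨?_, fun b1 h1 => (Option.some_inj.mp h1) ▸ hble_b0,
              fun w hw => (Option.some_inj.mp hw) ▸ hble_cand⟩
            rcases hmem' with hm | hm
            · rw [hupd'] at hm
              exact Or.inr (Or.inl hm)
            · exact Or.inr (Or.inr hm)
          · have hupd' : pvBestUpdate init (f i) = some b0 := by rw [hupd, if_neg hcb]
            have hble_b0 : b ≤ b0 := hinit' b0 hupd'
            have hble_cand : b ≤ cand := le_trans hble_b0 (le_of_not_gt hcb)
            refine ⟨?_, fun b1 h1 => (Option.some_inj.mp h1) ▸ hble_b0,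
              fun w hw => (Option.some_inj.mp hw) ▸ hble_cand⟩
            rcases hmem' with hm | hm
            · rw [hupd'] at hm
              exact Or.inl hm
            · exact Or.inr (Or.inr hm)
    refine ⟨?_, key.2.1, fun i' hi' w hw => ?_⟩
    · rcases key.1 with h1 | h1 | h1
      · exact Or.inl h1
      · exact Or.inr ⟨i, List.mem_cons_self .., h1⟩
      · obtain ⟨i2, hi2, h2⟩ := h1
        exact Or.inr ⟨i2, List.mem_cons_of_mem _ hi2, h2⟩
    · rcases List.mem_cons.mp hi' with rfl | hmem2
      · exact key.2.2 w hw
      · exact hrest i' hmem2 w hw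

-- ===== VERDICT (by name: the statement is the Claim_ definition above) =====
theorem smallest_window2_spec : Claim_equal_smallest_window2 := by
  intro haystack need _hdom hpre
  obtain ⟨hlen0, hneed0⟩ := hpre
  have hlen : 2 ≤ haystack.toList.length := by
    rw [PySem.Str.len_eq] at hlen0
    exact_mod_cast hlen0
  have hneed : ∀ c ∈ need.toList, c ∈ haystack.toList := by
    intro c hc
    simpa using List.all_eq_true.mp hneed0 c hc
  unfold Spec_smallest_window2 smallest_window2 smallest_window2_alt
  simp only []
  -- A's out2 is the filtered substring list
  rw [PySem.List.foldl_append_if_eq_filter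
    (fun xxx => need.toList.all (fun char => PySem.Str.isIn (String.ofList [char]) xxx))]
  rw [List.nil_append]
  set n := haystack.toList.length with hn
  -- valid substring characterisation of A's out2
  have hvalid : ∀ s : String,
      (need.toList.all (fun char => PySem.Str.isIn (String.ofList [char]) s)) = true
        ↔ ∀ c ∈ need.toList, c ∈ s.toList := by
    intro s
    rw [List.all_eq_true]
    constructor
    · intro h c hc
      have := h c hc
      rw [PySem.Str.isIn_iff_infix] at this
      simpa [pvSingleton_infix] using this
    · intro h c hc
      rw [PySem.Str.isIn_iff_infix]
      simpa [pvSingleton_infix] using h c hc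
  have hmemout2 : ∀ s : String,
      s ∈ (((PySem.List.pyRange 2 (PySem.Str.len haystack + 1)).foldl (fun out i =>
          (PySem.List.pyRange 0 (PySem.Str.len haystack - i + 1)).foldl (fun out xxx =>
            out ++ [PySem.Str.slice haystack (some xxx) (some (xxx + i))]) out) ([] : List String)).filter
          (fun xxx => need.toList.all (fun char => PySem.Str.isIn (String.ofList [char]) xxx)))
        ↔ (∃ x L : Nat, 2 ≤ L ∧ x + L ≤ n ∧ s = pvWin haystack x L) ∧
          ∀ c ∈ need.toList, c ∈ s.toList := by
    intro s
    rw [List.mem_filter, pvMemOut, hvalid]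
  -- the whole haystack is a member, so A's min exists
  have hwhole : pvWin haystack 0 n ∈ _ := (hmemout2 (pvWin haystack 0 n)).2
    ⟨⟨0, n, hlen, by omega, rfl⟩, by
      rw [pvWin_toList]
      intro c hc
      simp only [List.drop_zero, hn, List.take_length]
      exact hneed c hc⟩
  rcases hA : PySem.List.min? (((PySem.List.pyRange 2 (PySem.Str.len haystack + 1)).foldl (fun out i =>
          (PySem.List.pyRange 0 (PySem.Str.len haystack - i + 1)).foldl (fun out xxx =>
            out ++ [PySem.Str.slice haystack (some xxx) (some (xxx + i))]) out) ([] : List String)).filter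
          (fun xxx => need.toList.all (fun char => PySem.Str.isIn (String.ofList [char]) xxx)))
      (fun x => x) with _ | mA
  · rw [PySem.List.min?_eq_none_iff] at hA
    rw [hA] at hwhole
    simp at hwhole
  -- B's fold
  rcases hB : (List.range (n - 1)).foldl (fun best i => pvBestUpdate best
      (pvFindWin haystack i i (haystack.toList.drop i) (PySem.Set.ofList need.toList))) none
    with _ | mB
  · exfalso
    obtain ⟨-, hall⟩ := pvRunMin_none
      (fun i => pvFindWin haystack i i (haystack.toList.drop i) (PySem.Set.ofList need.toList))
      _ _ hB
    obtain ⟨w, e', hfw, -, -, -⟩ := pvFindWin_complete haystack 0 (haystack.toList.drop 0) 0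
      (PySem.Set.ofList need.toList) rfl (le_refl 0) n (by omega) (le_refl n) (by omega)
      (by intro c hc
          rw [PySem.Set.mem_ofList] at hc
          simp only [List.drop_zero, Nat.sub_zero, hn, List.take_length]
          exact hneed c hc)
    have h0 : (0 : Nat) ∈ List.range (n - 1) := by rw [List.mem_range]; omega
    have hfw0 : pvFindWin haystack 0 0 (haystack.toList.drop 0) (PySem.Set.ofList need.toList)
        = none := hall 0 h0
    rw [hfw0] at hfw
    cases hfw
  -- both sides reduce to mA = mB
  simp only [Option.getD_some]
  have hBprops := pvRunMin_some
    (fun i => pvFindWin haystack i i (haystack.toList.drop i) (PySem.Set.ofList need.toList))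
    _ _ _ hB
  -- mA ≤ mB
  have hAB : mA ≤ mB := by
    rcases hBprops.1 with h | ⟨i, hi, hfi⟩
    · cases h
    · obtain ⟨e, he1, he2, he3, he4, he5⟩ := pvFindWin_sound haystack i
        (haystack.toList.drop i) i (PySem.Set.ofList need.toList) rfl (le_refl i) mB hfi
      have hmB : mB ∈ _ := (hmemout2 mB).2
        ⟨⟨i, e - i, by omega, by omega, he4⟩, ?_⟩
      · exact PySem.List.min?_isMin hA mB hmB
      · intro c hc
        rw [he4, pvWin_toList]
        exact he5 c ((PySem.Set.mem_ofList need.toList c).2 hc)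
  -- mB ≤ mA
  have hBA : mB ≤ mA := by
    obtain ⟨⟨x, L, hL, hxL, hmAeq⟩, hmAvalid⟩ := (hmemout2 mA).1 (PySem.List.min?_mem hA)
    obtain ⟨w, e', hfw, he'1, he'2, hweq⟩ := pvFindWin_complete haystack x
      (haystack.toList.drop x) x (PySem.Set.ofList need.toList) rfl (le_refl x) (x + L)
      (by omega) (by omega) (by omega)
      (by intro c hc
          rw [PySem.Set.mem_ofList] at hc
          have := hmAvalid c hc
          rw [hmAeq, pvWin_toList] at this
          simpa [show x + L - x = L by omega] using this)
    have hx : x ∈ List.range (n - 1) := by rw [List.mem_range]; omega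
    have h1 : mB ≤ w := hBprops.2.2 x hx w hfw
    have h2 : w ≤ mA := by
      apply pvPrefix_le
      rw [hweq, pvWin_toList, hmAeq, pvWin_toList]
      have : (haystack.toList.drop x).take (e' - x)
          = ((haystack.toList.drop x).take L).take (e' - x) := by
        rw [List.take_take, min_eq_left (by omega)]
      rw [this]
      exact List.take_prefix ..
    exact le_trans h1 h2
  exact le_antisymm hAB hBA
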